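-- pv_equiv track=rewrite | github.com/shohei-kojima/MEGAnE | helper_scripts/Dfam_embl_to_MEGAnE_rep.py | reconstruct_L1HS_L1PREC2
-- ===== SOURCE A (Python) =====
-- def reconstruct_L1HS_L1PREC2(embl, out, headers):
--     reconstructed=set()
--     # reconstruct L1HS
--     found=[False, False, False]
--     for seqname in embl:
--         repbase,family,seq=embl[seqname]
--         if repbase == 'L1HS':
--             if '_5end' in seqname:
--                 end5=seq
--                 found[0]=True
--             elif '_orf2' in seqname:
--                 orf2=seq
--                 found[1]=True
--             elif '_3end' in seqname:
--                 end3=seq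
--                 found[2]=True
--     if sum(found) == 3:
--         seq= end5 + orf2[150:] + end3[150:]
--         out.append('>%s\t%s\t.\n%s\n' % ('L1HS', 'LINE/L1', seq))
--         headers['L1HS'] += 1
--         reconstructed.add('L1HS')
--         reconstructed.add('L1P1')
--     # reconstruct L1PREC2
--     found=[False, False, False]
--     for seqname in embl:
--         repbase,family,seq=embl[seqname]
--         if repbase == 'L1PREC2':
--             if '_5end' in seqname:
--                 end5=seq
--                 found[0]=True
--             elif '_orf2' in seqname:
--                 orf2=seq
--                 found[1]=True
--             elif '_3end' in seqname:
--                 end3=seq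
--                 found[2]=True
--     if sum(found) == 3:
--         seq= end5 + orf2[150:] + end3[150:]
--         out.append('>%s\t%s\t.\n%s\n' % ('L1PREC2', 'LINE/L1', seq))
--         headers['L1PREC2'] += 1
--         reconstructed.add('L1PREC2')
--     return out, headers, reconstructed
-- ===== SOURCE B (Python) =====
-- def reconstruct_L1HS_L1PREC2(embl, out, headers):
--     # One pass over embl grouping the parts per family, then a table-driven emit loop.
--     parts = {'L1HS': [None, None, None], 'L1PREC2': [None, None, None]}
--     for seqname in embl:
--         repbase, family, seq = embl[seqname]
--         p = parts.get(repbase)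
--         if p is not None:
--             if '_5end' in seqname:
--                 p[0] = seq
--             elif '_orf2' in seqname:
--                 p[1] = seq
--             elif '_3end' in seqname:
--                 p[2] = seq
--     reconstructed = set()
--     for name, tags in (('L1HS', ('L1HS', 'L1P1')), ('L1PREC2', ('L1PREC2',))):
--         e5, o2, e3 = parts[name]
--         if e5 is not None and o2 is not None and e3 is not None:
--             out.append('>%s\t%s\t.\n%s\n' % (name, 'LINE/L1', e5 + o2[150:] + e3[150:]))
--             headers[name] += 1
--             for t in tags:
--                 reconstructed.add(t)
--     return out, headers, reconstructed
-- ===== Notes on version B (the rewrite author's own statement) =====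
-- stated objective: simpler
-- what changed: A scans embl twice with duplicated emit code and a found-flags list; B does one grouping pass collecting the 5end/orf2/3end parts of both families at once, then a single table-driven loop over (family, tags) emits each reconstructed sequence.
import Mathlib
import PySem

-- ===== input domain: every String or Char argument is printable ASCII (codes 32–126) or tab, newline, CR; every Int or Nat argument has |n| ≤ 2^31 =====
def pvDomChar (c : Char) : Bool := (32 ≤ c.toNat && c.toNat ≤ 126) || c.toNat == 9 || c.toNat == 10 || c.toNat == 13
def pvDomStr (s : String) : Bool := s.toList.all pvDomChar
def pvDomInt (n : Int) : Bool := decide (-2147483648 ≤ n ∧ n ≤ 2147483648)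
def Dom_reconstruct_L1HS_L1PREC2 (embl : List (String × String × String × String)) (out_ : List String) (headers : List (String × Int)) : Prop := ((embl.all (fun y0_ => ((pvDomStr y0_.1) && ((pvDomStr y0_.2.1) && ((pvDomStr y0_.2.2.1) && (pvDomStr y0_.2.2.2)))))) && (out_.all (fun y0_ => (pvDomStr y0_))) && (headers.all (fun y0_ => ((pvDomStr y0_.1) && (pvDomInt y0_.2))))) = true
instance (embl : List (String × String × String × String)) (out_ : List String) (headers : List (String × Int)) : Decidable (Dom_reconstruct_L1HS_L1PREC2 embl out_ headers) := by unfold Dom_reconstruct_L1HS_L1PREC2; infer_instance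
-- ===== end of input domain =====

-- B replaces A's two scans of embl + duplicated emit code by one grouping pass and a
-- table-driven emit loop (objective: simpler). Return-value equivalence only: both Pythons
-- also mutate out/headers in place in the same way.

-- ===== PORT A =====
-- headers[name] += 1 on a dict ported as assoc list: bump the first matching key
-- (Python raises KeyError when absent — excluded by Pre_; the port is then a no-op).
def pvBump (hs : List (String × Int)) (name : String) : List (String × Int) :=
  match hs with
  | [] => []
  | (k, v) :: t => if k == name then (k, v + 1) :: t else (k, v) :: pvBump t name

-- Python's unassigned end5/orf2/end3 ported as strings initialised to "" (never read
-- unless the matching found-flag is true); found is the Bool triple.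
def pvStepA (fam : String) (st : (String × String × String) × (Bool × Bool × Bool))
    (e : String × String × String × String) : (String × String × String) × (Bool × Bool × Bool) :=
  if e.2.1 == fam then
    if PySem.Str.isIn "_5end" e.1 then ((e.2.2.2, st.1.2.1, st.1.2.2), (true, st.2.2.1, st.2.2.2))
    else if PySem.Str.isIn "_orf2" e.1 then ((st.1.1, e.2.2.2, st.1.2.2), (st.2.1, true, st.2.2.2))
    else if PySem.Str.isIn "_3end" e.1 then ((st.1.1, st.1.2.1, e.2.2.2), (st.2.1, st.2.2.1, true))
    else st
  else st

def reconstruct_L1HS_L1PREC2 (embl : List (String × String × String × String)) (out_ : List String) (headers : List (String × Int)) : List String × (List (String × Int)) × List String :=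
  -- reconstruct L1HS
  let st1 := embl.foldl (pvStepA "L1HS") (("", "", ""), (false, false, false))
  let r1 :=
    if st1.2.1 && st1.2.2.1 && st1.2.2.2 then
      let seq := st1.1.1 ++ PySem.Str.slice st1.1.2.1 (some 150) none ++ PySem.Str.slice st1.1.2.2 (some 150) none
      (out_ ++ [">L1HS\tLINE/L1\t.\n" ++ seq ++ "\n"], pvBump headers "L1HS",
       PySem.Set.add (PySem.Set.add ([] : PySem.Set String) "L1HS") "L1P1")
    else (out_, headers, ([] : PySem.Set String))
  -- reconstruct L1PREC2 (end5/orf2/end3 persist from the first loop; found is reset)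
  let st2 := embl.foldl (pvStepA "L1PREC2") (st1.1, (false, false, false))
  if st2.2.1 && st2.2.2.1 && st2.2.2.2 then
    let seq := st2.1.1 ++ PySem.Str.slice st2.1.2.1 (some 150) none ++ PySem.Str.slice st2.1.2.2 (some 150) none
    (r1.1 ++ [">L1PREC2\tLINE/L1\t.\n" ++ seq ++ "\n"], pvBump r1.2.1 "L1PREC2",
     PySem.Set.add r1.2.2 "L1PREC2")
  else r1

-- ===== PORT B =====
def pvSlotB (p : Option String × Option String × Option String) (seqname seq : String) :
    Option String × Option String × Option String :=
  if PySem.Str.isIn "_5end" seqname then (some seq, p.2.1, p.2.2)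
  else if PySem.Str.isIn "_orf2" seqname then (p.1, some seq, p.2.2)
  else if PySem.Str.isIn "_3end" seqname then (p.1, p.2.1, some seq)
  else p

-- Source B's parts dict has the two fixed keys 'L1HS'/'L1PREC2' only, so it is ported exactly
-- as a pair of part-triples; parts.get(repbase) is the two-way test below.
def pvStepB (st : (Option String × Option String × Option String) × (Option String × Option String × Option String))
    (e : String × String × String × String) :
    (Option String × Option String × Option String) × (Option String × Option String × Option String) :=
  if e.2.1 == "L1HS" then (pvSlotB st.1 e.1 e.2.2.2, st.2)
  else if e.2.1 == "L1PREC2" then (st.1, pvSlotB st.2 e.1 e.2.2.2)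
  else st

def pvEmitB (name : String) (tags : List String)
    (p : Option String × Option String × Option String)
    (acc : List String × (List (String × Int)) × List String) :
    List String × (List (String × Int)) × List String :=
  match p with
  | (some e5, some o2, some e3) =>
      (acc.1 ++ [">" ++ name ++ "\tLINE/L1\t.\n" ++ (e5 ++ PySem.Str.slice o2 (some 150) none ++ PySem.Str.slice e3 (some 150) none) ++ "\n"],
       pvBump acc.2.1 name,
       tags.foldl (fun s t => PySem.Set.add s t) acc.2.2)
  | _ => acc

def reconstruct_L1HS_L1PREC2_alt (embl : List (String × String × String × String)) (out_ : List String) (headers : List (String × Int)) : List String × (List (String × Int)) × List String :=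
  let g := embl.foldl pvStepB ((none, none, none), (none, none, none))
  [("L1HS", ["L1HS", "L1P1"]), ("L1PREC2", ["L1PREC2"])].foldl
    (fun acc nt => pvEmitB nt.1 nt.2 (if nt.1 == "L1HS" then g.1 else g.2) acc)
    (out_, headers, ([] : PySem.Set String))

-- ===== PRECONDITION & SPEC =====
-- fam has all three parts in embl (under the elif priority) — exactly when A's found-flags all end true
def pvComplete (fam : String) (embl : List (String × String × String × String)) : Prop :=
  (∃ e ∈ embl, e.2.1 = fam ∧ PySem.Str.isIn "_5end" e.1 = true) ∧
  (∃ e ∈ embl, e.2.1 = fam ∧ PySem.Str.isIn "_orf2" e.1 = true ∧ PySem.Str.isIn "_5end" e.1 = false) ∧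
  (∃ e ∈ embl, e.2.1 = fam ∧ PySem.Str.isIn "_3end" e.1 = true ∧ PySem.Str.isIn "_5end" e.1 = false ∧ PySem.Str.isIn "_orf2" e.1 = false)

-- Pre_: headers[fam] += 1 raises KeyError when fam is reconstructed but absent from headers;
-- duplicate seqnames are excluded only because they cannot arise from a Python dict argument.
def Pre_reconstruct_L1HS_L1PREC2 (embl : List (String × String × String × String)) (out_ : List String) (headers : List (String × Int)) : Prop :=
  (embl.map (·.1)).Nodup ∧
  (pvComplete "L1HS" embl → ∃ p ∈ headers, p.1 = "L1HS") ∧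
  (pvComplete "L1PREC2" embl → ∃ p ∈ headers, p.1 = "L1PREC2")
instance (embl : List (String × String × String × String)) (out_ : List String) (headers : List (String × Int)) : Decidable (Pre_reconstruct_L1HS_L1PREC2 embl out_ headers) := by unfold Pre_reconstruct_L1HS_L1PREC2 pvComplete; infer_instance

def pvWitness_reconstruct_L1HS_L1PREC2 : (List (String × String × String × String)) × List String × (List (String × Int)) :=
  ([("a_5end", "L1HS", "LINE/L1", "AAA"), ("a_orf2", "L1HS", "LINE/L1", "BBB"), ("a_3end", "L1HS", "LINE/L1", "CCC")],
   [], [("L1HS", 0)])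

def Spec_reconstruct_L1HS_L1PREC2 (embl : List (String × String × String × String)) (out_ : List String) (headers : List (String × Int)) (out : List String × (List (String × Int)) × List String) : Prop := out = reconstruct_L1HS_L1PREC2_alt embl out_ headers
instance (embl : List (String × String × String × String)) (out_ : List String) (headers : List (String × Int)) (out : List String × (List (String × Int)) × List String) : Decidable (Spec_reconstruct_L1HS_L1PREC2 embl out_ headers out) := by unfold Spec_reconstruct_L1HS_L1PREC2; infer_instance

-- ===== CLAIM (what is proved, stated in full; the proofs are below) =====
def Claim_equal_reconstruct_L1HS_L1PREC2 : Prop := ∀ (embl : List (String × String × String × String)) (out_ : List String) (headers : List (String × Int)), Dom_reconstruct_L1HS_L1PREC2 embl out_ headers → Pre_reconstruct_L1HS_L1PREC2 embl out_ headers → Spec_reconstruct_L1HS_L1PREC2 embl out_ headers (reconstruct_L1HS_L1PREC2 embl out_ headers)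

-- ===== LEMMAS AND PROOFS =====

-- B's single grouping fold splits into one filtered fold per family
theorem pv_group_split (embl : List (String × String × String × String))
    (p q : Option String × Option String × Option String) :
    embl.foldl pvStepB (p, q) =
      (embl.foldl (fun r e => if e.2.1 == "L1HS" then pvSlotB r e.1 e.2.2.2 else r) p,
       embl.foldl (fun r e => if e.2.1 == "L1PREC2" then pvSlotB r e.1 e.2.2.2 else r) q) := by
  induction embl generalizing p q with
  | nil => rfl
  | cons e t ih =>
    simp only [List.foldl_cons, pvStepB]
    by_cases h1 : e.2.1 = "L1HS"
    · simp [h1, ih]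
    · by_cases h2 : e.2.1 = "L1PREC2" <;> simp [h1, h2, ih]

-- the invariant relating A's (strings, found-flags) state to B's option triple
def pvRel (st : (String × String × String) × (Bool × Bool × Bool))
    (o : Option String × Option String × Option String) : Prop :=
  (st.2.1 = o.1.isSome ∧ ∀ x, o.1 = some x → st.1.1 = x) ∧
  (st.2.2.1 = o.2.1.isSome ∧ ∀ x, o.2.1 = some x → st.1.2.1 = x) ∧
  (st.2.2.2 = o.2.2.isSome ∧ ∀ x, o.2.2 = some x → st.1.2.2 = x)

theorem pv_rel_step (fam : String) (st : (String × String × String) × (Bool × Bool × Bool))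
    (o : Option String × Option String × Option String) (e : String × String × String × String)
    (h : pvRel st o) :
    pvRel (pvStepA fam st e) (if e.2.1 == fam then pvSlotB o e.1 e.2.2.2 else o) := by
  obtain ⟨⟨s1, s2, s3⟩, f1, f2, f3⟩ := st
  obtain ⟨o1, o2, o3⟩ := o
  simp only [pvRel, pvStepA, pvSlotB] at *
  split_ifs <;> simp_all

theorem pv_rel_fold (fam : String) (embl : List (String × String × String × String))
    (st : (String × String × String) × (Bool × Bool × Bool))
    (o : Option String × Option String × Option String) (h : pvRel st o) :
    pvRel (embl.foldl (pvStepA fam) st)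
      (embl.foldl (fun r e => if e.2.1 == fam then pvSlotB r e.1 e.2.2.2 else r) o) := by
  induction embl generalizing st o with
  | nil => exact h
  | cons e t ih => exact ih _ _ (pv_rel_step fam st o e h)

theorem pv_rel_init (s : String × String × String) :
    pvRel (s, (false, false, false)) (none, none, none) := by
  simp [pvRel]

-- one emit stage: related states produce equal (out, headers, set) updates
theorem pv_emit_eq (name : String) (tags : List String)
    (st : (String × String × String) × (Bool × Bool × Bool))
    (o : Option String × Option String × Option String) (h : pvRel st o)
    (acc : List String × (List (String × Int)) × List String) :
    (if st.2.1 && st.2.2.1 && st.2.2.2 then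
      (acc.1 ++ [">" ++ name ++ "\tLINE/L1\t.\n" ++ (st.1.1 ++ PySem.Str.slice st.1.2.1 (some 150) none ++ PySem.Str.slice st.1.2.2 (some 150) none) ++ "\n"],
       pvBump acc.2.1 name,
       tags.foldl (fun s t => PySem.Set.add s t) acc.2.2)
     else acc) = pvEmitB name tags o acc := by
  obtain ⟨⟨s1, s2, s3⟩, f1, f2, f3⟩ := st
  obtain ⟨o1, o2, o3⟩ := o
  obtain ⟨⟨h1, v1⟩, ⟨h2, v2⟩, ⟨h3, v3⟩⟩ := h
  cases o1 <;> cases o2 <;> cases o3 <;> simp_all [pvEmitB]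

-- ===== VERDICT (by name: the statement is the Claim_ definition above) =====
theorem reconstruct_L1HS_L1PREC2_spec : Claim_equal_reconstruct_L1HS_L1PREC2 := by
  intro embl out_ headers _dom _pre
  unfold Spec_reconstruct_L1HS_L1PREC2 reconstruct_L1HS_L1PREC2 reconstruct_L1HS_L1PREC2_alt
  rw [pv_group_split]
  simp only [List.foldl_cons, List.foldl_nil]
  have h1 := pv_rel_fold "L1HS" embl (("", "", ""), (false, false, false)) (none, none, none)
    (pv_rel_init _)
  have e1 := pv_emit_eq "L1HS" ["L1HS", "L1P1"]
    (embl.foldl (pvStepA "L1HS") (("", "", ""), (false, false, false)))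
    (embl.foldl (fun r e => if e.2.1 == "L1HS" then pvSlotB r e.1 e.2.2.2 else r) (none, none, none))
    h1 (out_, headers, ([] : PySem.Set String))
  have h2 := pv_rel_fold "L1PREC2" embl
    ((embl.foldl (pvStepA "L1HS") (("", "", ""), (false, false, false))).1, (false, false, false))
    (none, none, none) (pv_rel_init _)
  have e2 := pv_emit_eq "L1PREC2" ["L1PREC2"]
    (embl.foldl (pvStepA "L1PREC2") ((embl.foldl (pvStepA "L1HS") (("", "", ""), (false, false, false))).1, (false, false, false)))
    (embl.foldl (fun r e => if e.2.1 == "L1PREC2" then pvSlotB r e.1 e.2.2.2 else r) (none, none, none))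
    h2
  simp only [show (("L1HS" : String) == "L1HS") = true from rfl,
             show (("L1PREC2" : String) == "L1HS") = false from rfl, if_true,
             Bool.false_eq_true, if_false]
  rw [← e1, ← e2]
  rfl
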